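-- pv_equiv track=rewrite | github.com/methi1999/rnn_kws | utils.py | collapse_phones
-- ===== SOURCE A (Python) =====
-- def replacement_dict():
--     return {'aa': ['ao'], 'ah': ['ax', 'ax-h'], 'er': ['axr'], 'hh': ['hv'], 'ih': ['ix'],
--             'l': ['el'], 'm': ['em'], 'n': ['en', 'nx'], 'ng': ['eng'], 'sh': ['zh'],
--             'pau': ['pcl', 'tcl', 'kcl', 'bcl', 'dcl', 'gcl', 'h#', 'epi', 'q'],
--             'uw': ['ux']}
--
-- def collapse_phones(seq):
--     replacement = replacement_dict()
--     final = []
--     for phone in seq: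
--         for father, sons in replacement.items():
--             if phone in sons:
--                 phone = father
--                 break
--         final.append(phone)
--     return final
-- ===== SOURCE B (Python) =====
-- # Flat son->father lookup table written out directly; one comprehension, no nested scans.
-- _FATHER = {
--     'ao': 'aa',
--     'ax': 'ah', 'ax-h': 'ah',
--     'axr': 'er',
--     'hv': 'hh',
--     'ix': 'ih',
--     'el': 'l',
--     'em': 'm',
--     'en': 'n', 'nx': 'n',
--     'eng': 'ng',
--     'zh': 'sh',
--     'pcl': 'pau', 'tcl': 'pau', 'kcl': 'pau', 'bcl': 'pau', 'dcl': 'pau',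
--     'gcl': 'pau', 'h#': 'pau', 'epi': 'pau', 'q': 'pau',
--     'ux': 'uw',
-- }
--
-- def collapse_phones(seq):
--     return [_FATHER.get(phone, phone) for phone in seq]
-- ===== Notes on version B (the rewrite author's own statement) =====
-- stated objective: faster
-- what changed: B replaces A's per-phone rescan of the father->sons dict with a flat, precomputed son->father table and a single comprehension of O(1) lookups.
import Mathlib
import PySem

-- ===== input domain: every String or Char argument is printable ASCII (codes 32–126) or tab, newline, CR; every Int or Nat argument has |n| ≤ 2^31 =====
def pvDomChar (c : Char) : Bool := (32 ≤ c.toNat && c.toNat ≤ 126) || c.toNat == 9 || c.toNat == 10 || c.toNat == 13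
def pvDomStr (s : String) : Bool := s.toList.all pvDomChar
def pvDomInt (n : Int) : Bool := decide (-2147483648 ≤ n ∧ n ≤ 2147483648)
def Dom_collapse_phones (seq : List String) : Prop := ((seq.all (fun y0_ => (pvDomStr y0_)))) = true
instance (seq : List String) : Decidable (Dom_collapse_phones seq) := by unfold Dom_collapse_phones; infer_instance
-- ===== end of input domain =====

-- B replaces A's per-phone rescan of the father->sons dict with a flat precomputed son->father table and a single pass of lookups.


-- ===== PORT A =====
-- module helper replacement_dict() (insertion-ordered items list)
def pvReplacementItems : List (String × List String) :=
  [("aa", ["ao"]), ("ah", ["ax", "ax-h"]), ("er", ["axr"]), ("hh", ["hv"]), ("ih", ["ix"]),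
   ("l", ["el"]), ("m", ["em"]), ("n", ["en", "nx"]), ("ng", ["eng"]), ("sh", ["zh"]),
   ("pau", ["pcl", "tcl", "kcl", "bcl", "dcl", "gcl", "h#", "epi", "q"]),
   ("uw", ["ux"])]

-- inner 'for father, sons in replacement.items(): if phone in sons: phone = father; break'
def pvInnerA : List (String × List String) → String → String
  | [], phone => phone
  | (father, sons) :: rest, phone =>
      if sons.contains phone then father else pvInnerA rest phone

def collapse_phones (seq : List String) : List String :=
  seq.foldl (fun final phone => final ++ [pvInnerA pvReplacementItems phone]) []

-- ===== PORT B =====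
-- module constant _FATHER: the flat son->father table, written out literally
def pvFather : PySem.Dict String String := PySem.Dict.mk
  [("ao", "aa"),
   ("ax", "ah"), ("ax-h", "ah"),
   ("axr", "er"),
   ("hv", "hh"),
   ("ix", "ih"),
   ("el", "l"),
   ("em", "m"),
   ("en", "n"), ("nx", "n"),
   ("eng", "ng"),
   ("zh", "sh"),
   ("pcl", "pau"), ("tcl", "pau"), ("kcl", "pau"), ("bcl", "pau"), ("dcl", "pau"),
   ("gcl", "pau"), ("h#", "pau"), ("epi", "pau"), ("q", "pau"),
   ("ux", "uw")]

def collapse_phones_alt (seq : List String) : List String :=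
  seq.map (fun phone => pvFather.getD phone phone)

-- ===== PRECONDITION & SPEC =====
def Spec_collapse_phones (seq : List String) (out : List String) : Prop := out = collapse_phones_alt seq
instance (seq : List String) (out : List String) : Decidable (Spec_collapse_phones seq out) := by unfold Spec_collapse_phones; infer_instance

-- ===== CLAIM (what is proved, stated in full; the proofs are below) =====
def Claim_equal_collapse_phones : Prop := ∀ (seq : List String), Dom_collapse_phones seq → Spec_collapse_phones seq (collapse_phones seq)

-- ===== LEMMAS AND PROOFS =====

lemma pvPointwise (phone : String) :
    pvInnerA pvReplacementItems phone = pvFather.getD phone phone := by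
  by_cases h : phone ∈ (["ao", "ax", "ax-h", "axr", "hv", "ix", "el", "em", "en", "nx", "eng", "zh", "pcl", "tcl", "kcl", "bcl", "dcl", "gcl", "h#", "epi", "q", "ux"] : List String)
  · simp only [List.mem_cons, List.not_mem_nil, or_false] at h
    rcases h with rfl|rfl|rfl|rfl|rfl|rfl|rfl|rfl|rfl|rfl|rfl|rfl|rfl|rfl|rfl|rfl|rfl|rfl|rfl|rfl|rfl|rfl <;> decide
  · simp only [List.mem_cons, List.not_mem_nil, or_false, not_or] at h
    obtain ⟨h1, h2, h3, h4, h5, h6, h7, h8, h9, h10, h11, h12, h13, h14, h15, h16, h17, h18, h19, h20, h21, h22⟩ := h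
    simp [pvInnerA, pvReplacementItems, pvFather, PySem.Dict.getD_eq_get?_getD,
      PySem.Dict.get?_mk_cons, PySem.Dict.get?, h1, Ne.symm h1, h2, Ne.symm h2, h3, Ne.symm h3, h4, Ne.symm h4, h5, Ne.symm h5, h6, Ne.symm h6, h7, Ne.symm h7, h8, Ne.symm h8, h9, Ne.symm h9, h10, Ne.symm h10, h11, Ne.symm h11, h12, Ne.symm h12, h13, Ne.symm h13, h14, Ne.symm h14, h15, Ne.symm h15, h16, Ne.symm h16, h17, Ne.symm h17, h18, Ne.symm h18, h19, Ne.symm h19, h20, Ne.symm h20, h21, Ne.symm h21, h22, Ne.symm h22]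

-- ===== VERDICT (by name: the statement is the Claim_ definition above) =====
theorem collapse_phones_spec : Claim_equal_collapse_phones := by
  intro seq _
  unfold Spec_collapse_phones collapse_phones collapse_phones_alt
  rw [PySem.List.foldl_append_singleton_eq_map]
  exact List.map_congr_left fun phone _ => pvPointwise phone
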